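-- pv_equiv track=rewrite | github.com/skosukhin/mkhelper | mkhelper/depgen.py | convert_arg_line_to_args
-- ===== SOURCE A (Python) =====
-- def convert_arg_line_to_args(arg_line):
--     try:
--         # Drop everything after the first occurrence of #:
--         arg_line = arg_line[: arg_line.index("#")]
--     except ValueError:
--         pass
--
--     result = []
--     # Do not regard consecutive whitespaces as a single separator:
--     for arg in arg_line.split(" "):
--         if arg:
--             result.append(arg)
--         elif result:
--             # The previous argument has a significant whitespace:
--             result[-1] += " "
--     return result
-- ===== SOURCE B (Python) =====
-- def convert_arg_line_to_args(arg_line):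
--     # Single character-level scan: no index/slice pass and no split pass.
--     # Fields are kept as lists of characters and joined once at the end.
--     fields = []
--     buf = []
--
--     def close():
--         # A non-empty buffer becomes a new field; an empty buffer after a
--         # previous field marks a significant space on that field.
--         if buf:
--             fields.append(buf.copy())
--             buf.clear()
--         elif fields:
--             fields[-1].append(' ')
--
--     for ch in arg_line:
--         if ch == '#':
--             break
--         if ch == ' ':
--             close()
--         else:
--             buf.append(ch)
--     close()
--     return [''.join(f) for f in fields]
-- ===== Notes on version B (the rewrite author's own statement) =====
-- stated objective: alternative
-- what changed: Replaces A's three-pass pipeline (index('#') + slice, split(' '), then a fold over the token list) by a single character-level scan that breaks at '#' and maintains a field buffer, closing fields on spaces; no intermediate token list is built.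
import Mathlib
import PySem

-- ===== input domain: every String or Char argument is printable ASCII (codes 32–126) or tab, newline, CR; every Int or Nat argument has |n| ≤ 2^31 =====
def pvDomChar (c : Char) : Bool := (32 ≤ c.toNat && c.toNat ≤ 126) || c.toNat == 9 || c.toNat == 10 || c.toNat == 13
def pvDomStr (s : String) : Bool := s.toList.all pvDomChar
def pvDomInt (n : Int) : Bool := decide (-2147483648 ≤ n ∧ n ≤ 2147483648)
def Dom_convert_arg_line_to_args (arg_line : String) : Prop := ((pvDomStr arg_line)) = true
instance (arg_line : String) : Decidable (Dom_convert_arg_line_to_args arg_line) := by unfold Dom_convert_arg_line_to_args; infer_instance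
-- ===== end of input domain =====

-- B replaces A's truncate-then-split-then-fold pipeline by one character-level scan
-- with a buffer (objective: alternative decomposition, same cost).

-- ===== PORT A =====
def convert_arg_line_to_args (arg_line : String) : List String :=
  -- try: arg_line = arg_line[: arg_line.index("#")]  except ValueError: pass
  -- (str.index raises ValueError exactly where str.find returns -1)
  let i : Int := PySem.Str.find arg_line "#"
  let arg_line := if i = -1 then arg_line else PySem.Str.slice arg_line none (some i)
  ((PySem.Str.split? arg_line " ").getD []).foldl
    (fun result arg =>
      if arg ≠ "" then result ++ [arg]
      else if result ≠ [] then result.dropLast ++ [result.getLast! ++ " "]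
      else result) []

-- ===== PORT B =====
-- close(): a non-empty buffer becomes a new field (and the buffer is cleared);
-- an empty buffer after a previous field appends a significant space to it
def pvClose (fields : List (List Char)) (buf : List Char) : List (List Char) :=
  if buf ≠ [] then fields ++ [buf]
  else if fields ≠ [] then fields.dropLast ++ [fields.getLast! ++ [' ']]
  else fields

-- the for-loop of Source B: break on '#', close on ' ', otherwise extend the buffer;
-- the [] case is the final close() after the loop
def pvScan : List Char → List (List Char) → List Char → List (List Char)
  | [], fields, buf => pvClose fields buf
  | c :: rest, fields, buf =>
    if c = '#' then pvClose fields buf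
    else if c = ' ' then pvScan rest (pvClose fields buf) []
    else pvScan rest fields (buf ++ [c])

def convert_arg_line_to_args_alt (arg_line : String) : List String :=
  (pvScan arg_line.toList [] []).map String.ofList

-- ===== PRECONDITION & SPEC =====
def Spec_convert_arg_line_to_args (arg_line : String) (out : List String) : Prop := out = convert_arg_line_to_args_alt arg_line
instance (arg_line : String) (out : List String) : Decidable (Spec_convert_arg_line_to_args arg_line out) := by unfold Spec_convert_arg_line_to_args; infer_instance

-- ===== CLAIM (what is proved, stated in full; the proofs are below) =====
def Claim_equal_convert_arg_line_to_args : Prop := ∀ (arg_line : String), Dom_convert_arg_line_to_args arg_line → Spec_convert_arg_line_to_args arg_line (convert_arg_line_to_args arg_line)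

-- ===== LEMMAS AND PROOFS =====

-- simple recursive model of splitting on a single space
def mySplit : List Char → List (List Char)
  | [] => [[]]
  | c :: rest =>
    if c = ' ' then [] :: mySplit rest
    else (mySplit rest).modifyHead (c :: ·)

theorem modifyHead_idfun {α : Type} (l : List α) : l.modifyHead (fun x => x) = l := by
  cases l <;> rfl

theorem mySplit_ne_nil (l : List Char) : mySplit l ≠ [] := by
  induction l with
  | nil => simp [mySplit]
  | cons c rest ih =>
    simp only [mySplit]
    split_ifs
    · simp
    · cases h : mySplit rest with
      | nil => exact absurd h ih
      | cons t ts => simp [List.modifyHead]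

theorem splitOn_go_eq (l : List Char) : ∀ (fuel : Nat) (cur : List Char) (acc : List (List Char)),
    l.length < fuel →
    PySem.Chars.splitOn.go [' '] fuel l cur acc
      = acc.reverse ++ (mySplit l).modifyHead (cur.reverse ++ ·) := by
  induction l with
  | nil =>
    intro fuel cur acc h
    match fuel with
    | fuel + 1 => simp [PySem.Chars.splitOn.go, mySplit]
  | cons c rest ih =>
    intro fuel cur acc h
    match fuel with
    | fuel + 1 =>
      by_cases hc : c = ' '
      · subst hc
        rw [show PySem.Chars.splitOn.go [' '] (fuel+1) (' ' :: rest) cur acc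
              = PySem.Chars.splitOn.go [' '] fuel rest [] (cur.reverse :: acc) by
            simp [PySem.Chars.splitOn.go, List.isPrefixOf]]
        rw [ih fuel [] (cur.reverse :: acc) (by simpa using Nat.lt_of_succ_lt_succ h)]
        simp [mySplit, modifyHead_idfun]
      · have hc' : ¬(' ' = c) := fun h => hc h.symm
        rw [show PySem.Chars.splitOn.go [' '] (fuel+1) (c :: rest) cur acc
              = PySem.Chars.splitOn.go [' '] fuel rest (c :: cur) acc by
            simp [PySem.Chars.splitOn.go, List.isPrefixOf, hc']]
        rw [ih fuel (c :: cur) acc (by simpa using Nat.lt_of_succ_lt_succ h)]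
        simp only [mySplit, if_neg hc]
        cases hms : mySplit rest with
        | nil => exact absurd hms (mySplit_ne_nil rest)
        | cons t ts => simp [List.modifyHead]

theorem splitOn_space (l : List Char) : PySem.Chars.splitOn l [' '] = mySplit l := by
  have := splitOn_go_eq l (l.length + 1) [] [] (Nat.lt_succ_self _)
  simpa [PySem.Chars.splitOn, modifyHead_idfun] using this

-- find on a single character counts the '#'-free prefix
theorem find_go_hash (l : List Char) : ∀ (k : Nat),
    PySem.Chars.find.go ['#'] l k
      = if '#' ∈ l then ((k : Int) + (l.takeWhile (· ≠ '#')).length) else -1 := by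
  induction l with
  | nil => intro k; simp [PySem.Chars.find.go]
  | cons c rest ih =>
    intro k
    by_cases hc : c = '#'
    · subst hc
      simp [PySem.Chars.find.go, List.isPrefixOf, List.takeWhile]
    · have hc' : ¬('#' = c) := fun h => hc h.symm
      rw [show PySem.Chars.find.go ['#'] (c :: rest) k = PySem.Chars.find.go ['#'] rest (k + 1) by
        simp [PySem.Chars.find.go, List.isPrefixOf, hc']]
      rw [ih (k + 1)]
      by_cases h : '#' ∈ rest
      · rw [if_pos h, if_pos (List.mem_cons_of_mem _ h), List.takeWhile_cons,
          if_pos (by simpa using hc)]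
        simp only [List.length_cons]
        push_cast; ring
      · rw [if_neg h, if_neg (by simp [hc', h])]

-- the A-side fold step, as a named function
def stepA (result : List String) (arg : String) : List String :=
  if arg ≠ "" then result ++ [arg]
  else if result ≠ [] then result.dropLast ++ [result.getLast! ++ " "]
  else result

theorem pvClose_eq_stepA (fields : List (List Char)) (buf : List Char) :
    (pvClose fields buf).map String.ofList
      = stepA (fields.map String.ofList) (String.ofList buf) := by
  simp only [pvClose, stepA]
  by_cases hb : buf = []
  · subst hb
    have h0 : String.ofList ([] : List Char) = "" := rfl
    rw [if_neg (by simp : ¬([] : List Char) ≠ []), h0,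
      if_neg (by simp : ¬("" : String) ≠ "")]
    by_cases hf : fields = []
    · subst hf; rfl
    · obtain ⟨ys, y, rfl⟩ := (List.eq_nil_or_concat fields).resolve_left hf
      rw [if_pos (by simp), if_pos (by simp)]
      have hsp : String.ofList [' '] = " " := rfl
      simp [List.concat_eq_append, String.ofList_append, hsp]
  · have hs : String.ofList buf ≠ "" := by
      intro he
      have : (String.ofList buf).toList = ("" : String).toList := by rw [he]
      simp at this
      exact hb this
    rw [if_pos hb, if_pos hs]
    simp

-- core: the char scan computes A's fold over mySplit, buffer folded into the head token
theorem pvScan_eq_fold (l : List Char) (hl : '#' ∉ l) :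
    ∀ (fields : List (List Char)) (buf : List Char),
    (pvScan l fields buf).map String.ofList
      = ((mySplit l).modifyHead (buf ++ ·)).foldl (fun r t => stepA r (String.ofList t))
          (fields.map String.ofList) := by
  induction l with
  | nil =>
    intro fields buf
    simp [pvScan, mySplit, pvClose_eq_stepA]
  | cons c rest ih =>
    intro fields buf
    have hc : c ≠ '#' := fun h => hl (h ▸ List.mem_cons_self ..)
    have hrest : '#' ∉ rest := fun h => hl (List.mem_cons_of_mem _ h)
    by_cases hs : c = ' '
    · subst hs
      rw [show pvScan (' ' :: rest) fields buf = pvScan rest (pvClose fields buf) [] by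
        simp [pvScan]]
      rw [ih hrest (pvClose fields buf) []]
      simp [mySplit, pvClose_eq_stepA, modifyHead_idfun]
    · rw [show pvScan (c :: rest) fields buf = pvScan rest fields (buf ++ [c]) by
        simp [pvScan, hc, hs]]
      rw [ih hrest fields (buf ++ [c])]
      simp only [mySplit, if_neg hs]
      cases hms : mySplit rest with
      | nil => exact absurd hms (mySplit_ne_nil rest)
      | cons t ts => simp [List.modifyHead]

-- scanning stops at the first '#': only the '#'-free prefix matters
theorem pvScan_takeWhile (l : List Char) : ∀ (fields : List (List Char)) (buf : List Char),
    pvScan l fields buf = pvScan (l.takeWhile (· ≠ '#')) fields buf := by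
  induction l with
  | nil => intro fields buf; rfl
  | cons c rest ih =>
    intro fields buf
    by_cases hc : c = '#'
    · subst hc; simp [pvScan, List.takeWhile]
    · rw [List.takeWhile_cons, if_pos (by simp [hc])]
      by_cases hs : c = ' '
      · subst hs; simp [pvScan, ih]
      · simp [pvScan, hc, hs, ih]

theorem hash_not_mem_takeWhile (l : List Char) : '#' ∉ l.takeWhile (· ≠ '#') := by
  intro h
  have := List.mem_takeWhile_imp h
  simp at this

theorem takeWhile_of_not_mem (l : List Char) (h : '#' ∉ l) :
    l.takeWhile (· ≠ '#') = l := by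
  induction l with
  | nil => rfl
  | cons c rest ih =>
    simp only [List.mem_cons, not_or] at h
    rw [List.takeWhile_cons, if_pos (by simpa using fun e => h.1 e.symm), ih h.2]

theorem take_takeWhile_len (l : List Char) :
    l.take (l.takeWhile (· ≠ '#')).length = l.takeWhile (· ≠ '#') := by
  induction l with
  | nil => rfl
  | cons c rest ih =>
    rw [List.takeWhile_cons]
    by_cases hc : c = '#'
    · rw [if_neg (by simp [hc])]; rfl
    · rw [if_pos (by simpa using hc)]
      rw [List.length_cons, List.take_succ_cons, ih]

theorem str_split_space (t : String) :
    (PySem.Str.split? t " ").getD [] = (mySplit t.toList).map String.ofList := by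
  have h : (" " : String).toList = [' '] := rfl
  simp only [PySem.Str.split?, PySem.Chars.split?, h]
  simp [splitOn_space]

-- ===== VERDICT (by name: the statement is the Claim_ definition above) =====
theorem convert_arg_line_to_args_spec : Claim_equal_convert_arg_line_to_args := by
  intro s _
  unfold Spec_convert_arg_line_to_args convert_arg_line_to_args_alt
  have hfind : PySem.Str.find s "#"
      = if '#' ∈ s.toList then ((s.toList.takeWhile (· ≠ '#')).length : Int) else -1 := by
    have := find_go_hash s.toList 0
    simpa [PySem.Chars.find] using this
  have hsl : (if PySem.Str.find s "#" = -1 then s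
      else PySem.Str.slice s none (some (PySem.Str.find s "#"))).toList
      = s.toList.takeWhile (· ≠ '#') := by
    by_cases hm : '#' ∈ s.toList
    · rw [hfind, if_pos hm, if_neg (by exact fun h => by omega)]
      rw [PySem.Str.toList_slice]
      simp only [PySem.Chars.slice, PySem.List.slice_to_natCast]
      exact take_takeWhile_len s.toList
    · rw [hfind, if_neg hm, if_pos rfl, takeWhile_of_not_mem _ hm]
  rw [show convert_arg_line_to_args s
      = ((PySem.Str.split?
          (if PySem.Str.find s "#" = -1 then s
           else PySem.Str.slice s none (some (PySem.Str.find s "#"))) " ").getD []).foldl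
        (fun result arg =>
          if arg ≠ "" then result ++ [arg]
          else if result ≠ [] then result.dropLast ++ [result.getLast! ++ " "]
          else result) [] from rfl]
  rw [pvScan_takeWhile, pvScan_eq_fold _ (hash_not_mem_takeWhile s.toList)]

  rw [str_split_space, hsl]
  rw [List.foldl_map]
  have hmh : (mySplit (s.toList.takeWhile (· ≠ '#'))).modifyHead (fun x => [] ++ x)
      = mySplit (s.toList.takeWhile (· ≠ '#')) := by
    simp [modifyHead_idfun]
  rw [hmh]
  rfl
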